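-- pv_equiv track=rewrite | github.com/PSgale/AdventOfCode | 2020/05/seat_id.py | find_empty_seat
-- ===== SOURCE A (Python) =====
-- def find_empty_seat(arr):
--     if_exist = False
--     for i in range(len(arr)):
--         if arr[i] == 1:
--             if_exist = True
--         if arr[i] == 0 and if_exist:
--             return i
--     return -1
-- ===== SOURCE B (Python) =====
-- def find_empty_seat(arr):
--     if 1 not in arr:
--         return -1
--     p = arr.index(1)
--     for i in range(p + 1, len(arr)):
--         if arr[i] == 0:
--             return i
--     return -1
-- ===== Notes on version B (the rewrite author's own statement) =====
-- stated objective: simpler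
-- what changed: A's single flag-carrying pass is replaced by a locate-then-scan decomposition: find the position of the first 1 (membership test + index), then scan only after it for the first 0.
import Mathlib
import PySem

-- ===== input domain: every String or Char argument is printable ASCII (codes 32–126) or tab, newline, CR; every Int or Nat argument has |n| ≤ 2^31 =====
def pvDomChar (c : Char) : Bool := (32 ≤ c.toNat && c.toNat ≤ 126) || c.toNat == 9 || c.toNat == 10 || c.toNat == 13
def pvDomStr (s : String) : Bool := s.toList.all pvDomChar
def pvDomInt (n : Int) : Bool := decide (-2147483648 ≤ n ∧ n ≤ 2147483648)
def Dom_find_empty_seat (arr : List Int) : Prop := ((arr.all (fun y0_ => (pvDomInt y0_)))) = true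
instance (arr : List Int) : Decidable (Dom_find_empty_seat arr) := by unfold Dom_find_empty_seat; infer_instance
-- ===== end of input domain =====

-- B replaces A's single flag-carrying pass with a locate-then-scan decomposition (simpler).

-- ===== PORT A =====
-- the for-loop of A: remaining elements, current index, the if_exist flag
def findA_go (arr : List Int) (i : Int) (if_exist : Bool) : Int :=
  match arr with
  | [] => -1
  | x :: xs =>
    let if_exist := if x = 1 then true else if_exist
    if x = 0 ∧ if_exist = true then i else findA_go xs (i + 1) if_exist

def find_empty_seat (arr : List Int) : Int := findA_go arr 0 false

-- ===== PORT B =====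
-- the second loop of B: scan elements from index i for the first 0
def altScan (arr : List Int) (i : Int) : Int :=
  match arr with
  | [] => -1
  | x :: xs => if x = 0 then i else altScan xs (i + 1)

def find_empty_seat_alt (arr : List Int) : Int :=
  match PySem.List.index? arr 1 with
  | none => -1
  | some p => altScan (arr.drop (p + 1)) ((p : Int) + 1)

-- ===== PRECONDITION & SPEC =====
def Spec_find_empty_seat (arr : List Int) (out : Int) : Prop := out = find_empty_seat_alt arr
instance (arr : List Int) (out : Int) : Decidable (Spec_find_empty_seat arr out) := by unfold Spec_find_empty_seat; infer_instance

-- ===== CLAIM (what is proved, stated in full; the proofs are below) =====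
def Claim_equal_find_empty_seat : Prop := ∀ (arr : List Int), Dom_find_empty_seat arr → Spec_find_empty_seat arr (find_empty_seat arr)

-- ===== LEMMAS AND PROOFS =====

-- once A's flag is set, the remaining loop is exactly B's scan for the first 0
theorem findA_go_true (arr : List Int) (i : Int) :
    findA_go arr i true = altScan arr i := by
  induction arr generalizing i with
  | nil => rfl
  | cons x xs ih =>
    simp only [findA_go, altScan]
    by_cases hx : x = 0
    · simp [hx]
    · simp [hx, ih]

theorem findA_go_false (arr : List Int) (i : Int) :
    findA_go arr i false =
      match PySem.List.index? arr 1 with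
      | none => -1
      | some p => altScan (arr.drop (p + 1)) (i + (p : Int) + 1) := by
  induction arr generalizing i with
  | nil => rfl
  | cons x xs ih =>
    by_cases hx : x = 1
    · subst hx
      rw [PySem.List.index?_cons_self]
      simp [findA_go, findA_go_true]
    · rw [PySem.List.index?_cons_of_ne xs hx]
      simp only [findA_go, if_neg hx, ih]
      cases h : PySem.List.index? xs 1 with
      | none => simp
      | some p =>
        simp only [Option.map_some]
        have hx0 : ¬ (x = 0 ∧ false = true) := by simp
        rw [if_neg hx0]
        simp only [List.drop_succ_cons]
        congr 1
        push_cast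
        ring

-- ===== VERDICT (by name: the statement is the Claim_ definition above) =====
theorem find_empty_seat_spec : Claim_equal_find_empty_seat := by
  intro arr _
  unfold Spec_find_empty_seat find_empty_seat find_empty_seat_alt
  rw [findA_go_false]
  cases h : PySem.List.index? arr 1 with
  | none => rfl
  | some p => simp
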